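-- pv_equiv track=rewrite | github.com/EdwardJKim/adventofcode2018 | day20/part2.py | more_than_100_doors
-- ===== SOURCE A (Python) =====
-- from collections import deque
-- from typing import List, Deque, Set, Tuple
--
-- def more_than_100_doors(grid:List[List[str]]) -> int:
--
--     m, n = len(grid), len(grid[0])
--
--     for i in range(m):
--         for j in range(n):
--             if grid[i][j] == 'X':
--                 row, col = i, j
--
--     q: Deque = deque()
--     q.append((row, col, 0))
--
--     visited: Set[Tuple[int, int]] = set()
--
--     count = 0
--
--     while q:
--
--          row, col, dist = q.popleft()
--
--          if (row, col) in visited or not (0 <= row < m and 0 <= col < n):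
--              continue
--          visited.add((row, col))
--
--          if dist >= 1000:
--              count += 1
--
--          for dr, dc in [(0, 1), (0, -1), (1, 0), (-1, 0)]:
--              if (0 <= row + dr < m and 0 <= col + dc < n
--                  and grid[row + dr][col + dc] in '|-'
--                  and (row + dr, col + dc) not in visited):
--                  q.append((row + 2 * dr, col + 2 * dc, dist + 1))
--
--     return count
-- ===== SOURCE B (Python) =====
-- def grow(grid, m, n, cells):
--     # one growth round: every room reachable through one open door from `cells`
--     out = set(cells)
--     for r, c in cells:
--         for dr, dc in [(0, 1), (0, -1), (1, 0), (-1, 0)]: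
--             if (0 <= r + dr < m and 0 <= c + dc < n
--                     and grid[r + dr][c + dc] in '|-'
--                     and 0 <= r + 2 * dr < m and 0 <= c + 2 * dc < n):
--                 out.add((r + 2 * dr, c + 2 * dc))
--     return out
--
--
-- def grow_times(grid, m, n, k, cells):
--     # at most k growth rounds (stop early at a fixpoint)
--     for _ in range(k):
--         bigger = grow(grid, m, n, cells)
--         if len(bigger) == len(cells):
--             break
--         cells = bigger
--     return cells
--
--
-- def more_than_100_doors(grid):
--     m, n = len(grid), len(grid[0])
--     xs = [(i, j) for i in range(m) for j in range(n) if grid[i][j] == 'X']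
--     start = xs[-1]
--
--     # rooms within 999 doors of the start: 999 bounded growth rounds
--     near = grow_times(grid, m, n, 999, {start})
--     # all reachable rooms: grow to the fixpoint
--     reach = near
--     while True:
--         bigger = grow(grid, m, n, reach)
--         if len(bigger) == len(reach):
--             break
--         reach = bigger
--     # rooms at door-distance >= 1000 = reachable but not within 999 doors
--     return len(reach) - len(near)
-- ===== Notes on version B (the rewrite author's own statement) =====
-- stated objective: alternative
-- what changed: Replaced the deque BFS with distance tags by a set-fixpoint computation: a whole-set growth step (all rooms one open door away) is iterated 999 times to get the rooms within 999 doors, iterated to a fixpoint to get all reachable rooms, and the answer is the difference of the two set sizes.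
import Mathlib
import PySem

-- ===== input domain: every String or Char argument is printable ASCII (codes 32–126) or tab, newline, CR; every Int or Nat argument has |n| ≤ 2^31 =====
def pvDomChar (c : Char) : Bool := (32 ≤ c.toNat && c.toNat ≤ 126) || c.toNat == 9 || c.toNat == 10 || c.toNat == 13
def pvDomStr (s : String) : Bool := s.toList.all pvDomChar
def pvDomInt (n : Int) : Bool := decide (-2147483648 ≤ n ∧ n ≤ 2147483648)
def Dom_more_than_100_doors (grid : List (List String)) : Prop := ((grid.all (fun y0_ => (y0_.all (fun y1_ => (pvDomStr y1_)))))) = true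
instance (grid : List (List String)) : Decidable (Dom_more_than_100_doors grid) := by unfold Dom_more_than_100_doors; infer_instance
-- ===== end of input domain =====

-- B replaces A's deque BFS with distance tags by a set-fixpoint computation: a whole-set
-- growth step (add every room one open door away) iterated 999 times gives the rooms within
-- 999 doors, iterated to a fixpoint gives all reachable rooms; the answer is the difference
-- of the two set sizes. Objective: alternative (not claimed faster).

-- ===== PORT A =====
-- shared grid helpers: grid[r][c] (total lookup; only used under bounds checks), bounds test, the 4 directions
def pvCell (grid : List (List String)) (r c : Int) : String :=
  PySem.List.pyGetD (PySem.List.pyGetD grid r []) c ""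

def pvInb (m n r c : Int) : Bool := decide (0 ≤ r ∧ r < m ∧ 0 ≤ c ∧ c < n)

def pvDirs : List (Int × Int) := [(0, 1), (0, -1), (1, 0), (-1, 0)]

-- measure helpers for termination of the loops of both ports: number of in-bounds cells not yet collected
def pvAllCells (m n : Int) : List (Int × Int) :=
  (PySem.List.pyRange 0 m 1).flatMap (fun i => (PySem.List.pyRange 0 n 1).map (fun j => (i, j)))

def pvUnvis (m n : Int) (v : List (Int × Int)) : Nat :=
  (pvAllCells m n).countP (fun p => !(v.contains p))

theorem pvUnvis_lt (m n : Int) (v w : List (Int × Int)) (x : Int × Int)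
    (hx : pvInb m n x.1 x.2 = true) (hxv : x ∉ v) (hxw : x ∈ w)
    (hsub : ∀ p, p ∈ v → p ∈ w) : pvUnvis m n w < pvUnvis m n v := by
  have hmem : x ∈ pvAllCells m n := by
    simp only [pvInb, decide_eq_true_eq] at hx
    simp only [pvAllCells, List.mem_flatMap, List.mem_map, PySem.List.mem_pyRange_one]
    exact ⟨x.1, ⟨by omega, by omega⟩, x.2, ⟨by omega, by omega⟩, rfl⟩
  obtain ⟨s, t, hst⟩ := List.append_of_mem hmem
  have hmono : ∀ l : List (Int × Int),
      l.countP (fun p => !(w.contains p)) ≤ l.countP (fun p => !(v.contains p)) := by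
    intro l
    apply List.countP_mono_left
    intro a _ ha
    simp only [Bool.not_eq_eq_eq_not, Bool.not_true, List.contains_eq_mem,
      decide_eq_false_iff_not] at *
    exact fun hav => ha (hsub a hav)
  have h1 := hmono s
  have h2 := hmono t
  unfold pvUnvis
  rw [hst]
  simp only [List.countP_append, List.countP_cons, List.contains_eq_mem] at h1 h2 ⊢
  simp only [hxw, hxv, decide_true, decide_false, Bool.not_true, Bool.not_false,
    Bool.false_eq_true, if_false, if_true]
  omega

-- port of A's while-loop over the deque q
def pvALoop (grid : List (List String)) (m n : Int)
    (q : List (Int × Int × Int)) (visited : PySem.Set (Int × Int)) (count : Int) : Int :=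
  match q with
  | [] => count
  | (row, col, dist) :: rest =>
    if PySem.Set.contains visited (row, col) || !pvInb m n row col then
      pvALoop grid m n rest visited count
    else
      let visited' := PySem.Set.add visited (row, col)
      let count' := if 1000 ≤ dist then count + 1 else count
      let enq := pvDirs.foldl (fun acc dd =>
        if pvInb m n (row + dd.1) (col + dd.2)
            && PySem.Str.isIn (pvCell grid (row + dd.1) (col + dd.2)) "|-"
            && !PySem.Set.contains visited' (row + dd.1, col + dd.2) then
          acc ++ [(row + 2 * dd.1, col + 2 * dd.2, dist + 1)]
        else acc) []
      pvALoop grid m n (rest ++ enq) visited' count'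
termination_by (pvUnvis m n visited, q.length)
decreasing_by
  · exact Prod.Lex.right _ (Nat.lt_succ_self _)
  · apply Prod.Lex.left
    rename_i h
    simp only [Bool.or_eq_true, Bool.not_eq_true', not_or, Bool.not_eq_false] at h
    obtain ⟨hc, hinb⟩ := h
    have hnm : (row, col) ∉ visited := by
      simpa [PySem.Set.contains, List.contains_eq_mem] using hc
    refine pvUnvis_lt m n visited _ (row, col) hinb hnm ?_ ?_
    · simp [PySem.Set.add, PySem.Set.contains, List.contains_eq_mem, hnm]
    · intro p hp
      simp only [PySem.Set.add]
      split <;> simp [hp]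

def more_than_100_doors (grid : List (List String)) : Int :=
  let m : Int := grid.length
  let n : Int := (PySem.List.pyGetD grid 0 []).length
  let pos := (PySem.List.pyRange 0 m 1).foldl (fun acc i =>
      (PySem.List.pyRange 0 n 1).foldl (fun acc j =>
        if pvCell grid i j = "X" then some (i, j) else acc) acc) (none : Option (Int × Int))
  let start := pos.getD (0, 0)
  pvALoop grid m n [(start.1, start.2, 0)] PySem.Set.empty 0

-- ===== PORT B =====
-- the door/bounds condition of Source B's grow step, and one candidate addition
def pvCondB (grid : List (List String)) (m n : Int) (rc dd : Int × Int) : Bool :=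
  pvInb m n (rc.1 + dd.1) (rc.2 + dd.2)
    && PySem.Str.isIn (pvCell grid (rc.1 + dd.1) (rc.2 + dd.2)) "|-"
    && pvInb m n (rc.1 + 2 * dd.1) (rc.2 + 2 * dd.2)

def pvGDir (grid : List (List String)) (m n : Int) (rc : Int × Int)
    (acc : PySem.Set (Int × Int)) (dd : Int × Int) : PySem.Set (Int × Int) :=
  if pvCondB grid m n rc dd then PySem.Set.add acc (rc.1 + 2 * dd.1, rc.2 + 2 * dd.2)
  else acc

def pvGStep (grid : List (List String)) (m n : Int)
    (acc : PySem.Set (Int × Int)) (rc : Int × Int) : PySem.Set (Int × Int) :=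
  pvDirs.foldl (pvGDir grid m n rc) acc

-- the inner loop of grow: process `cells`, accumulating into `acc` (= out)
def pvGrowFrom (grid : List (List String)) (m n : Int)
    (cells : List (Int × Int)) (acc : PySem.Set (Int × Int)) : PySem.Set (Int × Int) :=
  cells.foldl (pvGStep grid m n) acc

-- grow(grid, m, n, cells): out starts as a copy of the set `cells`
def pvGrow (grid : List (List String)) (m n : Int)
    (cells : PySem.Set (Int × Int)) : PySem.Set (Int × Int) :=
  pvGrowFrom grid m n cells cells

-- growth only appends fresh in-bounds rooms (termination fact for pvReach)
theorem pvGDirs_delta (grid : List (List String)) (m n : Int) (rc : Int × Int) :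
    ∀ (ds : List (Int × Int)) (acc : PySem.Set (Int × Int)),
      ∃ δ : List (Int × Int),
        ds.foldl (pvGDir grid m n rc) acc = acc ++ δ ∧
        ∀ x ∈ δ, pvInb m n x.1 x.2 = true ∧ x ∉ acc := by
  intro ds
  induction ds with
  | nil => exact fun acc => ⟨[], by simp⟩
  | cons dd ds ih =>
    intro acc
    simp only [List.foldl_cons]
    by_cases h : pvCondB grid m n rc dd = true
    · by_cases hm : (rc.1 + 2 * dd.1, rc.2 + 2 * dd.2) ∈ acc
      · have hstep : pvGDir grid m n rc acc dd = acc := by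
          simp [pvGDir, h, PySem.Set.add, List.contains_eq_mem, hm]
        rw [hstep]; exact ih acc
      · have hstep : pvGDir grid m n rc acc dd
            = acc ++ [(rc.1 + 2 * dd.1, rc.2 + 2 * dd.2)] := by
          simp [pvGDir, h, PySem.Set.add, List.contains_eq_mem, hm]
        rw [hstep]
        obtain ⟨δ, h1, h2⟩ := ih (acc ++ [(rc.1 + 2 * dd.1, rc.2 + 2 * dd.2)])
        have hinb : pvInb m n (rc.1 + 2 * dd.1) (rc.2 + 2 * dd.2) = true := by
          simp only [pvCondB, Bool.and_eq_true] at h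
          exact h.2
        refine ⟨(rc.1 + 2 * dd.1, rc.2 + 2 * dd.2) :: δ, by simpa using h1, ?_⟩
        intro x hx
        rcases List.mem_cons.mp hx with rfl | hx'
        · exact ⟨hinb, hm⟩
        · have := h2 x hx'
          exact ⟨this.1, fun hxa => this.2 (by simp [hxa])⟩
    · have hstep : pvGDir grid m n rc acc dd = acc := by simp [pvGDir, h]
      rw [hstep]; exact ih acc

theorem pvGrowFrom_delta (grid : List (List String)) (m n : Int) :
    ∀ (cells : List (Int × Int)) (acc : PySem.Set (Int × Int)),
      ∃ δ : List (Int × Int),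
        pvGrowFrom grid m n cells acc = acc ++ δ ∧
        ∀ x ∈ δ, pvInb m n x.1 x.2 = true ∧ x ∉ acc := by
  intro cells
  induction cells with
  | nil => exact fun acc => ⟨[], by simp [pvGrowFrom]⟩
  | cons rc cells ih =>
    intro acc
    obtain ⟨δ1, h11, h12⟩ := pvGDirs_delta grid m n rc pvDirs acc
    obtain ⟨δ2, h21, h22⟩ := ih (acc ++ δ1)
    refine ⟨δ1 ++ δ2, ?_, ?_⟩
    · simp only [pvGrowFrom, List.foldl_cons] at *
      rw [show pvGStep grid m n acc rc = acc ++ δ1 from h11, h21, List.append_assoc]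
    · intro x hx
      rcases List.mem_append.mp hx with hx1 | hx2
      · exact h12 x hx1
      · have := h22 x hx2
        exact ⟨this.1, fun hxa => this.2 (by simp [hxa])⟩

-- grow_times(grid, m, n, k, cells): at most k growth rounds, early break at a fixpoint
def pvGrowTimesAux (grid : List (List String)) (m n : Int) :
    Nat → PySem.Set (Int × Int) → PySem.Set (Int × Int)
  | 0, cells => cells
  | k + 1, cells =>
    if (pvGrow grid m n cells).length = cells.length then cells
    else pvGrowTimesAux grid m n k (pvGrow grid m n cells)

def pvGrowTimes (grid : List (List String)) (m n k : Int)
    (cells : PySem.Set (Int × Int)) : PySem.Set (Int × Int) :=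
  pvGrowTimesAux grid m n k.toNat cells

-- Source B's while-True loop: grow to the fixpoint
def pvReach (grid : List (List String)) (m n : Int)
    (reach : PySem.Set (Int × Int)) : PySem.Set (Int × Int) :=
  if (pvGrow grid m n reach).length = reach.length then reach
  else pvReach grid m n (pvGrow grid m n reach)
termination_by pvUnvis m n reach
decreasing_by
  rename_i hne
  obtain ⟨δ, h1, h2⟩ := pvGrowFrom_delta grid m n reach reach
  have hδ : δ ≠ [] := by
    intro hnil
    apply hne
    rw [show pvGrow grid m n reach = reach ++ δ from h1, hnil]
    simp
  match δ, h1, h2, hδ with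
  | y :: δ', h1, h2, _ =>
    rw [show pvGrow grid m n reach = reach ++ y :: δ' from h1]
    refine pvUnvis_lt m n reach _ y (h2 y (by simp)).1 (h2 y (by simp)).2 (by simp) ?_
    intro p hp
    simp [hp]

def more_than_100_doors_alt (grid : List (List String)) : Int :=
  let m : Int := grid.length
  let n : Int := (PySem.List.pyGetD grid 0 []).length
  let xs := (PySem.List.pyRange 0 m 1).flatMap (fun i =>
      (PySem.List.pyRange 0 n 1).filterMap (fun j =>
        if pvCell grid i j = "X" then some (i, j) else none))
  let start := (PySem.List.pyGet? xs (-1)).getD (0, 0)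
  let near := pvGrowTimes grid m n 999 (PySem.Set.ofList [start])
  let reach := pvReach grid m n near
  (reach.length : Int) - (near.length : Int)

-- ===== PRECONDITION & SPEC =====
-- Pre_ = exactly the inputs where Python A returns: a nonempty grid whose rows all have at
-- least len(grid[0]) entries (else IndexError in the scan) and with an 'X' among the first
-- len(grid[0]) entries of some row (else NameError: row/col unbound).
def Pre_more_than_100_doors (grid : List (List String)) : Prop :=
  grid ≠ [] ∧
  (∀ row ∈ grid, (PySem.List.pyGetD grid 0 []).length ≤ row.length) ∧
  (∃ row ∈ grid, "X" ∈ row.take (PySem.List.pyGetD grid 0 []).length)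

instance (grid : List (List String)) : Decidable (Pre_more_than_100_doors grid) := by
  unfold Pre_more_than_100_doors; infer_instance

def pvWitness_more_than_100_doors : List (List String) := [["X"]]

def Spec_more_than_100_doors (grid : List (List String)) (out : Int) : Prop :=
  out = more_than_100_doors_alt grid
instance (grid : List (List String)) (out : Int) : Decidable (Spec_more_than_100_doors grid out) := by
  unfold Spec_more_than_100_doors; infer_instance

-- ===== CLAIM (what is proved, stated in full; the proofs are below) =====
def Claim_equal_more_than_100_doors : Prop := ∀ (grid : List (List String)), Dom_more_than_100_doors grid → Pre_more_than_100_doors grid → Spec_more_than_100_doors grid (more_than_100_doors grid)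

-- ===== LEMMAS AND PROOFS =====

-- level-synchronous characterisation of A's BFS (proof-side intermediate): a frontier of the
-- rooms at door-distance d, with the new rooms appended to both the list and the visited set
def pvBDir (grid : List (List String)) (m n : Int) (rc : Int × Int)
    (acc : List (Int × Int) × PySem.Set (Int × Int)) (dd : Int × Int) :
    List (Int × Int) × PySem.Set (Int × Int) :=
  if pvInb m n (rc.1 + dd.1) (rc.2 + dd.2)
      && PySem.Str.isIn (pvCell grid (rc.1 + dd.1) (rc.2 + dd.2)) "|-" then
    if pvInb m n (rc.1 + 2 * dd.1) (rc.2 + 2 * dd.2)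
        && !PySem.Set.contains acc.2 (rc.1 + 2 * dd.1, rc.2 + 2 * dd.2) then
      (acc.1 ++ [(rc.1 + 2 * dd.1, rc.2 + 2 * dd.2)],
       PySem.Set.add acc.2 (rc.1 + 2 * dd.1, rc.2 + 2 * dd.2))
    else acc
  else acc

def pvBStep (grid : List (List String)) (m n : Int)
    (acc : List (Int × Int) × PySem.Set (Int × Int)) (rc : Int × Int) :
    List (Int × Int) × PySem.Set (Int × Int) :=
  pvDirs.foldl (pvBDir grid m n rc) acc

-- one direction step, coupled with B's grow step: both append the same fresh in-bounds rooms
theorem pvBG_dir (grid : List (List String)) (m n : Int) (rc : Int × Int)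
    (acc : List (Int × Int) × PySem.Set (Int × Int)) (dd : Int × Int) :
    ∃ δ : List (Int × Int),
      pvBDir grid m n rc acc dd = (acc.1 ++ δ, acc.2 ++ δ) ∧
      pvGDir grid m n rc acc.2 dd = acc.2 ++ δ ∧
      ∀ x ∈ δ, pvInb m n x.1 x.2 = true ∧ x ∉ acc.2 := by
  by_cases h1 : (pvInb m n (rc.1 + dd.1) (rc.2 + dd.2)
      && PySem.Str.isIn (pvCell grid (rc.1 + dd.1) (rc.2 + dd.2)) "|-") = true
  · by_cases h2 : pvInb m n (rc.1 + 2 * dd.1) (rc.2 + 2 * dd.2) = true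
    · have hcB : pvCondB grid m n rc dd = true := by
        unfold pvCondB; rw [h1, h2]; rfl
      by_cases hm : (rc.1 + 2 * dd.1, rc.2 + 2 * dd.2) ∈ acc.2
      · have hct : PySem.Set.contains acc.2 (rc.1 + 2 * dd.1, rc.2 + 2 * dd.2) = true := by
          simp [PySem.Set.contains, List.contains_eq_mem, hm]
        refine ⟨[], ?_, ?_, by simp⟩
        · unfold pvBDir
          rw [if_pos h1, if_neg (by rw [hct]; simp)]
          simp
        · unfold pvGDir
          rw [if_pos hcB]
          simp [PySem.Set.add, List.contains_eq_mem, hm]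
      · have hct : PySem.Set.contains acc.2 (rc.1 + 2 * dd.1, rc.2 + 2 * dd.2) = false := by
          simp [PySem.Set.contains, List.contains_eq_mem, hm]
        have hadd : PySem.Set.add acc.2 (rc.1 + 2 * dd.1, rc.2 + 2 * dd.2)
            = acc.2 ++ [(rc.1 + 2 * dd.1, rc.2 + 2 * dd.2)] := by
          simp [PySem.Set.add, List.contains_eq_mem, hm]
        refine ⟨[(rc.1 + 2 * dd.1, rc.2 + 2 * dd.2)], ?_, ?_, ?_⟩
        · unfold pvBDir
          rw [if_pos h1, if_pos (by rw [h2, hct]; rfl), hadd]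
        · unfold pvGDir
          rw [if_pos hcB, hadd]
        · intro x hx
          simp only [List.mem_singleton] at hx
          subst hx
          exact ⟨h2, hm⟩
    · have hcB : pvCondB grid m n rc dd = false := by
        unfold pvCondB
        rw [h1, Bool.eq_false_iff.mpr h2]
        rfl
      refine ⟨[], ?_, ?_, by simp⟩
      · unfold pvBDir
        rw [if_pos h1, if_neg (by rw [Bool.eq_false_iff.mpr h2]; simp)]
        simp
      · unfold pvGDir
        rw [if_neg (by rw [hcB]; simp)]
        simp
  · have hcB : pvCondB grid m n rc dd = false := by
      unfold pvCondB
      rw [Bool.eq_false_iff.mpr h1, Bool.false_and]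
    refine ⟨[], ?_, ?_, by simp⟩
    · unfold pvBDir
      rw [if_neg h1]
      simp
    · unfold pvGDir
      rw [if_neg (by rw [hcB]; simp)]
      simp

theorem pvBG_dirs (grid : List (List String)) (m n : Int) (rc : Int × Int) :
    ∀ (ds : List (Int × Int)) (acc : List (Int × Int) × PySem.Set (Int × Int)),
      ∃ δ : List (Int × Int),
        ds.foldl (pvBDir grid m n rc) acc = (acc.1 ++ δ, acc.2 ++ δ) ∧
        ds.foldl (pvGDir grid m n rc) acc.2 = acc.2 ++ δ ∧
        ∀ x ∈ δ, pvInb m n x.1 x.2 = true ∧ x ∉ acc.2 := by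
  intro ds
  induction ds with
  | nil => exact fun acc => ⟨[], by simp⟩
  | cons dd ds ih =>
    intro acc
    obtain ⟨δ1, hb1, hg1, hf1⟩ := pvBG_dir grid m n rc acc dd
    obtain ⟨δ2, hb2, hg2, hf2⟩ := ih (acc.1 ++ δ1, acc.2 ++ δ1)
    refine ⟨δ1 ++ δ2, ?_, ?_, ?_⟩
    · simp only [List.foldl_cons, hb1]
      rw [hb2]
      simp [List.append_assoc]
    · simp only [List.foldl_cons, hg1]
      rw [show acc.2 ++ δ1 = ((acc.1 ++ δ1, acc.2 ++ δ1) :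
            List (Int × Int) × PySem.Set (Int × Int)).2 from rfl] at hg2 ⊢
      rw [hg2, List.append_assoc]
    · intro x hx
      rcases List.mem_append.mp hx with hx1 | hx2
      · exact hf1 x hx1
      · have := hf2 x hx2
        exact ⟨this.1, fun hxa => this.2 (by simp [hxa])⟩

theorem pvBG_level (grid : List (List String)) (m n : Int) :
    ∀ (F : List (Int × Int)) (acc : List (Int × Int) × PySem.Set (Int × Int)),
      ∃ δ : List (Int × Int),
        F.foldl (pvBStep grid m n) acc = (acc.1 ++ δ, acc.2 ++ δ) ∧
        pvGrowFrom grid m n F acc.2 = acc.2 ++ δ ∧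
        ∀ x ∈ δ, pvInb m n x.1 x.2 = true ∧ x ∉ acc.2 := by
  intro F
  induction F with
  | nil => exact fun acc => ⟨[], by simp [pvGrowFrom]⟩
  | cons rc F ih =>
    intro acc
    obtain ⟨δ1, hb1, hg1, hf1⟩ := pvBG_dirs grid m n rc pvDirs acc
    obtain ⟨δ2, hb2, hg2, hf2⟩ := ih (acc.1 ++ δ1, acc.2 ++ δ1)
    refine ⟨δ1 ++ δ2, ?_, ?_, ?_⟩
    · simp only [List.foldl_cons, pvBStep, hb1]
      rw [hb2]
      simp [List.append_assoc]
    · show pvGrowFrom grid m n (rc :: F) acc.2 = acc.2 ++ (δ1 ++ δ2)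
      dsimp only at hg2
      simp only [pvGrowFrom, List.foldl_cons]
      rw [show pvGStep grid m n acc.2 rc = acc.2 ++ δ1 from hg1]
      rw [show F.foldl (pvGStep grid m n) (acc.2 ++ δ1)
            = pvGrowFrom grid m n F (acc.2 ++ δ1) from rfl, hg2, List.append_assoc]
    · intro x hx
      rcases List.mem_append.mp hx with hx1 | hx2
      · exact hf1 x hx1
      · have := hf2 x hx2
        exact ⟨this.1, fun hxa => this.2 (by simp [hxa])⟩

-- port of the level-synchronous BFS loop (used only to characterise A)
def pvBLoop (grid : List (List String)) (m n : Int)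
    (frontier : List (Int × Int)) (visited : PySem.Set (Int × Int)) (d count : Int) : Int :=
  match frontier with
  | [] => count
  | rc :: rest =>
    let count' := if 1000 ≤ d then count + ((rc :: rest).length : Int) else count
    let r := (rc :: rest).foldl (pvBStep grid m n) ([], visited)
    pvBLoop grid m n r.1 r.2 (d + 1) count'
termination_by (pvUnvis m n visited, frontier.length)
decreasing_by
  obtain ⟨δ, h1, _, h3⟩ := pvBG_level grid m n (rc :: rest) ([], visited)
  match δ, h1, h3 with
  | [], h1, _ =>
    rw [h1]
    simp only [List.append_nil]
    exact Prod.Lex.right _ (by simp)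
  | y :: δ', h1, h3 =>
    rw [h1]
    apply Prod.Lex.left
    refine pvUnvis_lt m n visited _ y (h3 y (by simp)).1 (h3 y (by simp)).2 (by simp) ?_
    intro p hp
    simp [hp]

-- same parity componentwise (rooms reachable from s keep s's parity; door cells never have it)
def pvPar (s x : Int × Int) : Prop := x.1 % 2 = s.1 % 2 ∧ x.2 % 2 = s.2 % 2

-- the rooms behind open doors around p, in direction order
def pvTargets (grid : List (List String)) (m n : Int) (p : Int × Int) : List (Int × Int) :=
  (pvDirs.filter (fun dd => pvInb m n (p.1 + dd.1) (p.2 + dd.2)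
      && PySem.Str.isIn (pvCell grid (p.1 + dd.1) (p.2 + dd.2)) "|-")).map
    (fun dd => (p.1 + 2 * dd.1, p.2 + 2 * dd.2))

-- the common filter: keep first occurrences of in-bounds rooms not yet visited
def pvFiltStep (m n : Int) (acc : List (Int × Int) × List (Int × Int)) (p : Int × Int) :
    List (Int × Int) × List (Int × Int) :=
  if pvInb m n p.1 p.2 && !acc.2.contains p then (acc.1 ++ [p], acc.2 ++ [p]) else acc

-- pvNew v E = the genuinely new rooms a level's raw list E contributes, in first-occurrence order
def pvNew (m n : Int) : List (Int × Int) → List (Int × Int) → List (Int × Int)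
  | _, [] => []
  | v, p :: E =>
    if pvInb m n p.1 p.2 && !v.contains p then p :: pvNew m n (v ++ [p]) E
    else pvNew m n v E

theorem pvFilt_spec (m n : Int) :
    ∀ (E : List (Int × Int)) (l0 v : List (Int × Int)),
      E.foldl (pvFiltStep m n) (l0, v) = (l0 ++ pvNew m n v E, v ++ pvNew m n v E) := by
  intro E
  induction E with
  | nil => intro l0 v; simp [pvNew]
  | cons p E ih =>
    intro l0 v
    simp only [List.foldl_cons]
    by_cases h : (pvInb m n p.1 p.2 && !v.contains p) = true
    · have hstep : pvFiltStep m n (l0, v) p = (l0 ++ [p], v ++ [p]) := by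
        unfold pvFiltStep
        exact if_pos h
      rw [hstep, ih]
      rw [show pvNew m n v (p :: E) = p :: pvNew m n (v ++ [p]) E from by rw [pvNew, if_pos h]]
      simp
    · have hstep : pvFiltStep m n (l0, v) p = (l0, v) := by
        unfold pvFiltStep
        exact if_neg h
      rw [hstep, ih]
      rw [show pvNew m n v (p :: E) = pvNew m n v E from by rw [pvNew, if_neg h]]

theorem pvNew_mem (m n : Int) :
    ∀ (E v : List (Int × Int)), ∀ x ∈ pvNew m n v E,
      x ∈ E ∧ pvInb m n x.1 x.2 = true ∧ x ∉ v := by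
  intro E
  induction E with
  | nil => intro v x hx; simp [pvNew] at hx
  | cons p E ih =>
    intro v x hx
    rw [pvNew] at hx
    by_cases h : (pvInb m n p.1 p.2 && !v.contains p) = true
    · rw [if_pos h] at hx
      have h' := h
      simp only [Bool.and_eq_true, Bool.not_eq_true', List.contains_eq_mem,
        decide_eq_false_iff_not] at h'
      rcases List.mem_cons.mp hx with rfl | hx'
      · exact ⟨List.mem_cons_self, h'.1, h'.2⟩
      · have := ih (v ++ [p]) x hx'
        refine ⟨List.mem_cons_of_mem _ this.1, this.2.1, fun hxv => this.2.2 ?_⟩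
        simp [hxv]
    · rw [if_neg h] at hx
      have := ih v x hx
      exact ⟨List.mem_cons_of_mem _ this.1, this.2⟩

-- a door cell's parity differs from every visited room's parity, so A's third test is always true
theorem pvDoor_not_contains (s p : Int × Int) (v : List (Int × Int))
    (hv : ∀ x ∈ v, pvPar s x) (hp : pvPar s p) (dd : Int × Int) (hdd : dd ∈ pvDirs) :
    v.contains (p.1 + dd.1, p.2 + dd.2) = false := by
  have hnm : (p.1 + dd.1, p.2 + dd.2) ∉ v := by
    intro hmem
    have hpar := hv _ hmem
    simp only [pvDirs, List.mem_cons, List.not_mem_nil, or_false] at hdd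
    obtain ⟨hp1, hp2⟩ := hp
    obtain ⟨hq1, hq2⟩ := hpar
    rcases hdd with rfl | rfl | rfl | rfl <;> simp_all <;> omega
  simp [List.contains_eq_mem, hnm]

theorem pvTargets_par (grid : List (List String)) (m n : Int) (s p x : Int × Int)
    (hp : pvPar s p) (hx : x ∈ pvTargets grid m n p) : pvPar s x := by
  simp only [pvTargets, List.mem_map, List.mem_filter] at hx
  obtain ⟨dd, ⟨hdd, -⟩, rfl⟩ := hx
  simp only [pvDirs, List.mem_cons, List.not_mem_nil, or_false] at hdd
  obtain ⟨hp1, hp2⟩ := hp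
  rcases hdd with rfl | rfl | rfl | rfl <;> exact ⟨by simp; omega, by simp; omega⟩

-- A's per-room enqueue equals the door targets (the visited test on the door cell is vacuous)
theorem pvAEnq_eq (grid : List (List String)) (m n : Int) (s p : Int × Int)
    (v' : List (Int × Int)) (hv : ∀ x ∈ v', pvPar s x) (hp : pvPar s p) (d : Int) :
    pvDirs.foldl (fun acc dd =>
        if pvInb m n (p.1 + dd.1) (p.2 + dd.2)
            && PySem.Str.isIn (pvCell grid (p.1 + dd.1) (p.2 + dd.2)) "|-"
            && !PySem.Set.contains v' (p.1 + dd.1, p.2 + dd.2) then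
          acc ++ [(p.1 + 2 * dd.1, p.2 + 2 * dd.2, d)]
        else acc) []
      = (pvTargets grid m n p).map (fun t => (t.1, t.2, d)) := by
  have hcongr : pvDirs.foldl (fun acc dd =>
        if pvInb m n (p.1 + dd.1) (p.2 + dd.2)
            && PySem.Str.isIn (pvCell grid (p.1 + dd.1) (p.2 + dd.2)) "|-"
            && !PySem.Set.contains v' (p.1 + dd.1, p.2 + dd.2) then
          acc ++ [(p.1 + 2 * dd.1, p.2 + 2 * dd.2, d)]
        else acc) []
      = pvDirs.foldl (fun acc dd =>
        if (pvInb m n (p.1 + dd.1) (p.2 + dd.2)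
            && PySem.Str.isIn (pvCell grid (p.1 + dd.1) (p.2 + dd.2)) "|-") then
          acc ++ [(p.1 + 2 * dd.1, p.2 + 2 * dd.2, d)]
        else acc) [] := by
    apply PySem.List.foldl_congr_mem
    intro acc dd hdd
    have hfalse : PySem.Set.contains v' (p.1 + dd.1, p.2 + dd.2) = false :=
      pvDoor_not_contains s p v' hv hp dd hdd
    rw [hfalse]
    simp
  rw [hcongr, PySem.List.foldl_append_if]
  simp [pvTargets, List.map_map, Function.comp]

-- processing one whole level of A's deque
theorem pvALoop_level (grid : List (List String)) (m n : Int) (s : Int × Int) (d : Int) :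
    ∀ (E : List (Int × Int)) (N : List (Int × Int × Int)) (v : List (Int × Int)) (cnt : Int),
      (∀ x ∈ v, pvPar s x) → (∀ p ∈ E, pvPar s p) →
      pvALoop grid m n (E.map (fun p => (p.1, p.2, d)) ++ N) v cnt
        = pvALoop grid m n
            (N ++ (pvNew m n v E).flatMap (fun p => (pvTargets grid m n p).map (fun t => (t.1, t.2, d + 1))))
            (v ++ pvNew m n v E)
            (cnt + if 1000 ≤ d then ((pvNew m n v E).length : Int) else 0) := by
  intro E
  induction E with
  | nil =>
    intro N v cnt _ _
    simp [pvNew]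
  | cons p E ih =>
    intro N v cnt hv hE
    have hcv : PySem.Set.contains v (p.1, p.2) = v.contains p := by
      simp [PySem.Set.contains]
    by_cases hc : (pvInb m n p.1 p.2 && !v.contains p) = true
    · -- the popped room is new and in bounds: A visits it
      have hc' := hc
      simp only [Bool.and_eq_true, Bool.not_eq_true', List.contains_eq_mem,
        decide_eq_false_iff_not] at hc'
      have hcon : v.contains p = false := by
        simp [List.contains_eq_mem, hc'.2]
      have hskip : (PySem.Set.contains v (p.1, p.2) || !pvInb m n p.1 p.2) = false := by
        rw [hcv, hcon, hc'.1]
        rfl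
      have hadd : PySem.Set.add v (p.1, p.2) = v ++ [p] := by
        simp [PySem.Set.add, PySem.Set.contains, List.contains_eq_mem, Prod.mk.eta, hc'.2]
      have hp : pvPar s p := hE p List.mem_cons_self
      have hv' : ∀ x ∈ v ++ [p], pvPar s x := by
        intro x hx
        rcases List.mem_append.mp hx with hx | hx
        · exact hv x hx
        · simp at hx; subst hx; exact hp
      simp only [List.map_cons, List.cons_append]
      rw [pvALoop]
      rw [if_neg (show ¬(PySem.Set.contains v (p.1, p.2) || !pvInb m n p.1 p.2) = true from by
        rw [hskip]; exact Bool.false_ne_true)]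
      simp only [hadd]
      rw [pvAEnq_eq grid m n s p (v ++ [p]) hv' hp (d + 1)]
      rw [List.append_assoc]
      rw [ih (N ++ (pvTargets grid m n p).map (fun t => (t.1, t.2, d + 1))) (v ++ [p])
        (if 1000 ≤ d then cnt + 1 else cnt) hv' (fun q hq => hE q (List.mem_cons_of_mem _ hq))]
      rw [show pvNew m n v (p :: E) = p :: pvNew m n (v ++ [p]) E from by rw [pvNew, if_pos hc]]
      simp only [List.flatMap_cons]
      rw [← List.append_assoc]
      rw [show v ++ p :: pvNew m n (v ++ [p]) E = (v ++ [p]) ++ pvNew m n (v ++ [p]) E from by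
        simp]
      rw [show cnt + (if 1000 ≤ d then (((p :: pvNew m n (v ++ [p]) E).length) : Int) else 0)
          = (if 1000 ≤ d then cnt + 1 else cnt)
            + (if 1000 ≤ d then (((pvNew m n (v ++ [p]) E).length) : Int) else 0) from by
        by_cases hd : 1000 ≤ d
        · simp [hd]
          omega
        · simp [hd]]
    · -- already visited or out of bounds: A skips the popped entry
      have hskip : (PySem.Set.contains v (p.1, p.2) || !pvInb m n p.1 p.2) = true := by
        rw [hcv]
        revert hc
        cases hb : pvInb m n p.1 p.2 <;> cases hb2 : v.contains p <;> simp_all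
      simp only [List.map_cons, List.cons_append]
      rw [pvALoop]
      rw [if_pos hskip]
      rw [ih N v cnt hv (fun q hq => hE q (List.mem_cons_of_mem _ hq))]
      rw [show pvNew m n v (p :: E) = pvNew m n v E from by rw [pvNew, if_neg hc]]

-- B's per-room step is the common filter over that room's targets
theorem pvBStep_eq_filt (grid : List (List String)) (m n : Int) (rc : Int × Int) :
    ∀ (ds : List (Int × Int)) (acc : List (Int × Int) × List (Int × Int)),
      ds.foldl (pvBDir grid m n rc) acc
        = (((ds.filter (fun dd => pvInb m n (rc.1 + dd.1) (rc.2 + dd.2)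
            && PySem.Str.isIn (pvCell grid (rc.1 + dd.1) (rc.2 + dd.2)) "|-")).map
              (fun dd => (rc.1 + 2 * dd.1, rc.2 + 2 * dd.2))).foldl (pvFiltStep m n) acc) := by
  intro ds
  induction ds with
  | nil => intro acc; rfl
  | cons dd ds ih =>
    intro acc
    simp only [List.foldl_cons]
    by_cases h1 : (pvInb m n (rc.1 + dd.1) (rc.2 + dd.2)
        && PySem.Str.isIn (pvCell grid (rc.1 + dd.1) (rc.2 + dd.2)) "|-") = true
    · rw [List.filter_cons, if_pos h1]
      simp only [List.map_cons, List.foldl_cons]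
      have hstep : pvBDir grid m n rc acc dd
          = pvFiltStep m n acc (rc.1 + 2 * dd.1, rc.2 + 2 * dd.2) := by
        unfold pvBDir pvFiltStep
        simp only [PySem.Set.contains]
        rw [if_pos h1]
        by_cases h2 : (pvInb m n (rc.1 + 2 * dd.1) (rc.2 + 2 * dd.2)
            && !acc.2.contains ((rc.1 + 2 * dd.1, rc.2 + 2 * dd.2) : Int × Int)) = true
        · rw [if_pos h2, if_pos h2]
          have h2' := h2
          simp only [Bool.and_eq_true, Bool.not_eq_true', List.contains_eq_mem,
            decide_eq_false_iff_not] at h2'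
          rw [show PySem.Set.add acc.2 (rc.1 + 2 * dd.1, rc.2 + 2 * dd.2)
              = acc.2 ++ [(rc.1 + 2 * dd.1, rc.2 + 2 * dd.2)] from by
            simp [PySem.Set.add, PySem.Set.contains, List.contains_eq_mem, h2'.2]]
        · rw [if_neg h2, if_neg h2]
      rw [hstep, ih]
    · rw [List.filter_cons, if_neg h1]
      have hstep : pvBDir grid m n rc acc dd = acc := by
        unfold pvBDir
        exact if_neg h1
      rw [hstep, ih]

theorem pvBLevel_eq (grid : List (List String)) (m n : Int) :
    ∀ (F : List (Int × Int)) (acc : List (Int × Int) × List (Int × Int)),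
      F.foldl (pvBStep grid m n) acc
        = (F.flatMap (pvTargets grid m n)).foldl (pvFiltStep m n) acc := by
  intro F
  induction F with
  | nil => intro acc; rfl
  | cons rc F ih =>
    intro acc
    simp only [List.foldl_cons, List.flatMap_cons, List.foldl_append]
    rw [show pvBStep grid m n acc rc
        = (pvTargets grid m n rc).foldl (pvFiltStep m n) acc from
      pvBStep_eq_filt grid m n rc pvDirs acc, ih]

-- the bisimulation: A's deque holding one full level equals the level-synchronous loop
theorem pvMain (grid : List (List String)) (m n : Int) (s : Int × Int) :
    ∀ (k : Nat) (v E : List (Int × Int)) (d cnt : Int),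
      pvUnvis m n v = k →
      (∀ x ∈ v, pvPar s x) → (∀ p ∈ E, pvPar s p) →
      pvALoop grid m n (E.map (fun p => (p.1, p.2, d))) v cnt
        = pvBLoop grid m n (pvNew m n v E) (v ++ pvNew m n v E) d cnt := by
  intro k
  induction k using Nat.strong_induction_on with
  | _ k ih =>
    intro v E d cnt hk hv hE
    have hlvl := pvALoop_level grid m n s d E [] v cnt hv hE
    rw [List.append_nil, List.nil_append] at hlvl
    cases hFc : pvNew m n v E with
    | nil =>
      rw [hFc] at hlvl
      simp only [List.flatMap_nil, List.append_nil, List.length_nil] at hlvl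
      rw [hlvl]
      rw [show (∀ c : Int, pvALoop grid m n [] v c = c) from fun c => by rw [pvALoop]]
      rw [show pvBLoop grid m n [] (v ++ []) d cnt = cnt from by rw [pvBLoop]]
      simp
    | cons f0 F' =>
      have hFmem := pvNew_mem m n E v
      rw [hFc] at hFmem
      rw [hlvl, hFc]
      rw [← List.map_flatMap]
      have hv2 : ∀ x ∈ v ++ f0 :: F', pvPar s x := by
        intro x hx
        rcases List.mem_append.mp hx with hx | hx
        · exact hv x hx
        · exact hE x ((hFmem x hx).1)
      have hE2 : ∀ p ∈ (f0 :: F').flatMap (pvTargets grid m n), pvPar s p := by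
        intro q hq
        obtain ⟨p, hpF, hqt⟩ := List.mem_flatMap.mp hq
        exact pvTargets_par grid m n s p q (hE p (hFmem p hpF).1) hqt
      have hlt : pvUnvis m n (v ++ f0 :: F') < k := by
        rw [← hk]
        refine pvUnvis_lt m n v _ f0 (hFmem f0 List.mem_cons_self).2.1
          (hFmem f0 List.mem_cons_self).2.2 (by simp) (fun p hp => by simp [hp])
      rw [ih (pvUnvis m n (v ++ f0 :: F')) hlt (v ++ f0 :: F')
        ((f0 :: F').flatMap (pvTargets grid m n)) (d + 1)
        (cnt + if 1000 ≤ d then (((f0 :: F').length : Nat) : Int) else 0) rfl hv2 hE2]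
      conv_rhs => rw [pvBLoop]
      rw [show ((f0 :: F').foldl (pvBStep grid m n) ([], v ++ f0 :: F'))
          = ([] ++ pvNew m n (v ++ f0 :: F') ((f0 :: F').flatMap (pvTargets grid m n)),
             (v ++ f0 :: F') ++ pvNew m n (v ++ f0 :: F') ((f0 :: F').flatMap (pvTargets grid m n))) from by
        rw [pvBLevel_eq grid m n (f0 :: F') ([], v ++ f0 :: F'),
          pvFilt_spec m n ((f0 :: F').flatMap (pvTargets grid m n)) [] (v ++ f0 :: F')]]
      simp only [List.nil_append]
      congr 1
      by_cases hd : 1000 ≤ d <;> simp [hd]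

-- ===== bridging the level loop to B's fixpoint computation =====

-- the invariant: V lists older rooms P then the frontier F, and every target of P is already in V
def pvTgtsIn (grid : List (List String)) (m n : Int) (P V : List (Int × Int)) : Prop :=
  ∀ rc ∈ P, ∀ dd ∈ pvDirs, pvCondB grid m n rc dd = true →
    (rc.1 + 2 * dd.1, rc.2 + 2 * dd.2) ∈ V

-- adding only absorbed targets changes nothing
theorem pvG2_dirs (grid : List (List String)) (m n : Int) (rc : Int × Int) :
    ∀ (ds : List (Int × Int)) (acc : PySem.Set (Int × Int)),
      (∀ dd ∈ ds, pvCondB grid m n rc dd = true →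
        (rc.1 + 2 * dd.1, rc.2 + 2 * dd.2) ∈ acc) →
      ds.foldl (pvGDir grid m n rc) acc = acc := by
  intro ds
  induction ds with
  | nil => intro acc _; rfl
  | cons dd ds ih =>
    intro acc h
    simp only [List.foldl_cons]
    have hstep : pvGDir grid m n rc acc dd = acc := by
      by_cases hc : pvCondB grid m n rc dd = true
      · simp [pvGDir, hc, PySem.Set.add, List.contains_eq_mem, h dd List.mem_cons_self hc]
      · simp [pvGDir, hc]
    rw [hstep]
    exact ih acc (fun d hd => h d (List.mem_cons_of_mem _ hd))

theorem pvG2 (grid : List (List String)) (m n : Int) :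
    ∀ (cells : List (Int × Int)) (acc : PySem.Set (Int × Int)),
      pvTgtsIn grid m n cells acc → pvGrowFrom grid m n cells acc = acc := by
  intro cells
  induction cells with
  | nil => intro acc _; rfl
  | cons rc cells ih =>
    intro acc h
    simp only [pvGrowFrom, List.foldl_cons]
    have hstep : pvGStep grid m n acc rc = acc :=
      pvG2_dirs grid m n rc pvDirs acc (h rc List.mem_cons_self)
    rw [hstep]
    exact ih acc (fun q hq => h q (List.mem_cons_of_mem _ hq))

-- every open-door target of a processed cell ends up in the grow result
theorem pvG3_dirs (grid : List (List String)) (m n : Int) (rc : Int × Int) :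
    ∀ (ds : List (Int × Int)) (acc : PySem.Set (Int × Int)) (dd : Int × Int),
      dd ∈ ds → pvCondB grid m n rc dd = true →
      (rc.1 + 2 * dd.1, rc.2 + 2 * dd.2) ∈ ds.foldl (pvGDir grid m n rc) acc := by
  intro ds
  induction ds with
  | nil => intro acc dd h; simp at h
  | cons d0 ds ih =>
    intro acc dd hdd hc
    simp only [List.foldl_cons]
    rcases List.mem_cons.mp hdd with rfl | hdd'
    · have hmem : (rc.1 + 2 * dd.1, rc.2 + 2 * dd.2) ∈ pvGDir grid m n rc acc dd := by
        simp only [pvGDir, hc, if_true]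
        by_cases hm : (rc.1 + 2 * dd.1, rc.2 + 2 * dd.2) ∈ acc
        · simp [PySem.Set.add, List.contains_eq_mem, hm]
        · simp [PySem.Set.add, List.contains_eq_mem, hm]
      obtain ⟨δ, h1, _⟩ := pvGDirs_delta grid m n rc ds (pvGDir grid m n rc acc dd)
      rw [h1]
      exact List.mem_append.mpr (Or.inl hmem)
    · exact ih (pvGDir grid m n rc acc d0) dd hdd' hc

theorem pvG3 (grid : List (List String)) (m n : Int) :
    ∀ (cells : List (Int × Int)) (acc : PySem.Set (Int × Int)) (rc : Int × Int),
      rc ∈ cells → ∀ dd ∈ pvDirs, pvCondB grid m n rc dd = true →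
      (rc.1 + 2 * dd.1, rc.2 + 2 * dd.2) ∈ pvGrowFrom grid m n cells acc := by
  intro cells
  induction cells with
  | nil => intro acc rc h; simp at h
  | cons c0 cells ih =>
    intro acc rc hrc dd hdd hc
    simp only [pvGrowFrom, List.foldl_cons]
    rcases List.mem_cons.mp hrc with rfl | hrc'
    · have hmem : (rc.1 + 2 * dd.1, rc.2 + 2 * dd.2) ∈ pvGStep grid m n acc rc :=
        pvG3_dirs grid m n rc pvDirs acc dd hdd hc
      obtain ⟨δ, h1, _⟩ := pvGrowFrom_delta grid m n cells (pvGStep grid m n acc rc)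
      rw [show cells.foldl (pvGStep grid m n) (pvGStep grid m n acc rc)
            = pvGrowFrom grid m n cells (pvGStep grid m n acc rc) from rfl, h1]
      exact List.mem_append.mpr (Or.inl hmem)
    · exact ih (pvGStep grid m n acc c0) rc hrc' dd hdd hc

-- at a fixpoint of grow, both the bounded iteration and the closure loop are the identity
theorem pvAux_fix (grid : List (List String)) (m n : Int)
    (V : PySem.Set (Int × Int)) (h : pvGrow grid m n V = V) :
    ∀ k : Nat, pvGrowTimesAux grid m n k V = V := by
  intro k
  cases k with
  | zero => rfl
  | succ k => simp [pvGrowTimesAux, h]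

theorem pvReach_fix (grid : List (List String)) (m n : Int)
    (V : PySem.Set (Int × Int)) (h : pvGrow grid m n V = V) :
    pvReach grid m n V = V := by
  rw [pvReach, if_pos (by rw [h])]

-- the closure of any bounded iterate is the closure itself
theorem pvReach_aux (grid : List (List String)) (m n : Int) :
    ∀ (k : Nat) (V : PySem.Set (Int × Int)),
      pvReach grid m n (pvGrowTimesAux grid m n k V) = pvReach grid m n V := by
  intro k
  induction k with
  | zero => intro V; rfl
  | succ k ih =>
    intro V
    by_cases h : (pvGrow grid m n V).length = V.length
    · rw [show pvGrowTimesAux grid m n (k + 1) V = V from by simp [pvGrowTimesAux, h]]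
    · rw [show pvGrowTimesAux grid m n (k + 1) V
          = pvGrowTimesAux grid m n k (pvGrow grid m n V) from by simp [pvGrowTimesAux, h],
        ih (pvGrow grid m n V)]
      conv_rhs => rw [pvReach]
      rw [if_neg h]

-- the count computed by the level loop = |closure| - |999-bounded iterate| (relative to level d)
theorem pvCount (grid : List (List String)) (m n : Int) :
    ∀ (k : Nat) (F V : List (Int × Int)) (d cnt : Int),
      pvUnvis m n V = k →
      (∃ P, V = P ++ F ∧ pvTgtsIn grid m n P V) →
      pvBLoop grid m n F V d cnt
        = cnt + ((pvReach grid m n V).length : Int)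
          - (if 1000 ≤ d then (V.length : Int) - (F.length : Int)
             else ((pvGrowTimesAux grid m n (999 - d).toNat V).length : Int)) := by
  intro k
  induction k using Nat.strong_induction_on with
  | _ k ih =>
    intro F V d cnt hk hinv
    obtain ⟨P, hPV, hT⟩ := hinv
    have hgrow : pvGrow grid m n V = pvGrowFrom grid m n F V := by
      have h1 : pvGrow grid m n V = pvGrowFrom grid m n (P ++ F) V := by
        unfold pvGrow
        rw [← hPV]
      rw [h1, show pvGrowFrom grid m n (P ++ F) V
            = pvGrowFrom grid m n F (pvGrowFrom grid m n P V) from by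
          unfold pvGrowFrom; rw [List.foldl_append],
        pvG2 grid m n P V hT]
    cases F with
    | nil =>
      rw [show pvBLoop grid m n [] V d cnt = cnt from by rw [pvBLoop]]
      have hfix : pvGrow grid m n V = V := by
        rw [hgrow]; rfl
      rw [pvReach_fix grid m n V hfix, pvAux_fix grid m n V hfix]
      by_cases hd : (1000 : Int) ≤ d
      · simp only [hd, if_true, List.length_nil]
        push_cast
        omega
      · simp only [hd, if_false]
        omega
    | cons f0 rest =>
      rw [pvBLoop]
      obtain ⟨δ, hb, hg, hf⟩ := pvBG_level grid m n (f0 :: rest) ([], V)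
      simp only [List.nil_append] at hb
      have hgrow2 : pvGrow grid m n V = V ++ δ := by rw [hgrow]; exact hg
      cases hδ : δ with
      | nil =>
        subst hδ
        have hfix : pvGrow grid m n V = V := by simpa using hgrow2
        rw [hb]
        simp only
        rw [show pvBLoop grid m n [] (V ++ []) (d + 1)
              (if 1000 ≤ d then cnt + (((f0 :: rest).length : Nat) : Int) else cnt)
            = (if 1000 ≤ d then cnt + (((f0 :: rest).length : Nat) : Int) else cnt) from by
          rw [pvBLoop]]
        rw [pvReach_fix grid m n V hfix, pvAux_fix grid m n V hfix]
        have hVlen : V.length = P.length + (f0 :: rest).length := by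
          rw [hPV, List.length_append]
        by_cases hd : (1000 : Int) ≤ d
        · simp only [hd, if_true]
          omega
        · simp only [hd, if_false]
          omega
      | cons y δ' =>
        subst hδ
        have hlt : pvUnvis m n (V ++ y :: δ') < k := by
          rw [← hk]
          refine pvUnvis_lt m n V _ y (hf y (by simp)).1 (hf y (by simp)).2 (by simp) ?_
          intro p hp; simp [hp]
        have hinv' : ∃ P', V ++ y :: δ' = P' ++ y :: δ' ∧
            pvTgtsIn grid m n P' (V ++ y :: δ') := by
          refine ⟨V, rfl, ?_⟩
          intro rc hrc dd hdd hc
          rw [hPV] at hrc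
          rcases List.mem_append.mp hrc with hP | hF
          · exact List.mem_append.mpr (Or.inl (hT rc hP dd hdd hc))
          · have := pvG3 grid m n (f0 :: rest) V rc hF dd hdd hc
            rw [hg] at this
            exact this
        rw [hb]
        simp only
        rw [ih _ hlt (y :: δ') (V ++ y :: δ') (d + 1)
          (if 1000 ≤ d then cnt + (((f0 :: rest).length : Nat) : Int) else cnt) rfl hinv']
        have hRe : pvReach grid m n (V ++ y :: δ') = pvReach grid m n V := by
          conv_rhs => rw [pvReach]
          rw [if_neg (by rw [hgrow2]; simp), hgrow2]
        rw [hRe]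
        have hlen2 : (V ++ y :: δ').length = V.length + (y :: δ').length :=
          List.length_append ..
        by_cases hd : (1000 : Int) ≤ d
        · have hd1 : (1000 : Int) ≤ d + 1 := by omega
          simp only [hd, hd1, if_true]
          omega
        · by_cases hd1 : (1000 : Int) ≤ d + 1
          · -- d = 999
            have ht0 : (999 - d).toNat = 0 := by omega
            simp only [hd, hd1, if_true, if_false, ht0, pvGrowTimesAux]
            try omega
          · -- d ≤ 998
            have hsucc : (999 - d).toNat = (999 - (d + 1)).toNat + 1 := by omega
            have hne : ¬ (pvGrow grid m n V).length = V.length := by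
              rw [hgrow2, hlen2]; simp
            simp only [hd, hd1, if_false, hsucc]
            rw [show pvGrowTimesAux grid m n ((999 - (d + 1)).toNat + 1) V
                = pvGrowTimesAux grid m n (999 - (d + 1)).toNat (pvGrow grid m n V) from by
              simp [pvGrowTimesAux, hne], hgrow2]

-- nested foldl over two ranges = foldl over the flattened pair list
theorem pvFoldl_nested {α β γ : Type} (l1 : List α) (l2 : List β) (g : γ → α × β → γ) :
    ∀ a : γ, l1.foldl (fun a i => l2.foldl (fun a j => g a (i, j)) a) a
      = (l1.flatMap (fun i => l2.map (fun j => (i, j)))).foldl g a := by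
  induction l1 with
  | nil => intro a; rfl
  | cons i l1 ih =>
    intro a
    simp only [List.foldl_cons, List.flatMap_cons, List.foldl_append, List.foldl_map]
    exact ih _

theorem pvOr_getLast {α : Type} (x : α) (fm : List α) (a0 : Option α) :
    fm.getLast?.or (some x) = (x :: fm).getLast?.or a0 := by
  cases fm with
  | nil => simp
  | cons b l =>
    rw [List.getLast?_cons_cons]
    cases h : (b :: l).getLast? with
    | none => simp [List.getLast?_eq_none_iff] at h
    | some y => simp

-- a keep-the-last fold is the last element of the filtered list
theorem pvFoldl_lastSome {α : Type} (P : α → Prop) [DecidablePred P] :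
    ∀ (l : List α) (a0 : Option α),
      l.foldl (fun acc x => if P x then some x else acc) a0
        = (l.filterMap (fun x => if P x then some x else none)).getLast?.or a0 := by
  intro l
  induction l with
  | nil => intro a0; simp
  | cons x l ih =>
    intro a0
    simp only [List.foldl_cons]
    by_cases h : P x
    · rw [if_pos h, List.filterMap_cons_some
        (f := fun y => if P y then some y else none) (l := l) (b := x) (if_pos h), ih]
      exact pvOr_getLast x _ a0
    · rw [if_neg h, List.filterMap_cons_none
        (f := fun y => if P y then some y else none) (l := l) (if_neg h), ih]

-- ===== VERDICT (by name: the statement is the Claim_ definition above) =====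
theorem more_than_100_doors_spec : Claim_equal_more_than_100_doors := by
  intro grid _ hpre
  obtain ⟨hne, hlen, row, hrow, hX⟩ := hpre
  unfold Spec_more_than_100_doors
  simp only [more_than_100_doors, more_than_100_doors_alt]
  set m : Int := (grid.length : Int) with hm
  set n : Int := ((PySem.List.pyGetD grid 0 []).length : Int) with hn
  set xs : List (Int × Int) := (PySem.List.pyRange 0 m 1).flatMap (fun i =>
      (PySem.List.pyRange 0 n 1).filterMap (fun j =>
        if pvCell grid i j = "X" then some (i, j) else none)) with hxs
  -- A's nested scan computes the last element of xs
  have hpos : ((PySem.List.pyRange 0 m 1).foldl (fun acc i =>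
      (PySem.List.pyRange 0 n 1).foldl (fun acc j =>
        if pvCell grid i j = "X" then some (i, j) else acc) acc) (none : Option (Int × Int)))
      = xs.getLast? := by
    rw [pvFoldl_nested (PySem.List.pyRange 0 m 1) (PySem.List.pyRange 0 n 1)
      (fun acc p => if pvCell grid p.1 p.2 = "X" then some p else acc) none]
    rw [pvFoldl_lastSome (fun p : Int × Int => pvCell grid p.1 p.2 = "X") _ none]
    rw [Option.or_none]
    congr 1
    rw [hxs, List.filterMap_flatMap]
    congr 1
    funext i
    rw [List.filterMap_map]
    rfl
  -- Python's xs[-1] is the last element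
  have hget : PySem.List.pyGet? xs (-1) = xs.getLast? := by
    cases xs with
    | nil => rfl
    | cons a l =>
      have hidx : PySem.List.pyIdx? (l.length + 1) (-1) = some l.length := by
        simp [PySem.List.pyIdx?]
      simp [PySem.List.pyGet?, hidx, List.getLast?_eq_getElem?]
  -- xs is nonempty: Pre_ provides an 'X' within the first n entries of some row
  obtain ⟨i, hi, hrowi⟩ := List.mem_iff_getElem.mp hrow
  obtain ⟨j, hj, hXj⟩ := List.mem_iff_getElem.mp hX
  have hjn : j < (PySem.List.pyGetD grid 0 []).length := by
    rw [List.length_take] at hj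
    omega
  have hjrow : j < row.length := lt_of_lt_of_le hjn (hlen row hrow)
  have hcell : pvCell grid (i : Int) (j : Int) = "X" := by
    unfold pvCell
    rw [PySem.List.pyGetD_natCast, PySem.List.pyGetD_natCast,
      List.getD_eq_getElem grid [] hi, hrowi, List.getD_eq_getElem row "" hjrow]
    rw [List.getElem_take] at hXj
    exact hXj
  have hmemij : ((i : Int), (j : Int)) ∈ xs := by
    rw [hxs]
    simp only [List.mem_flatMap, List.mem_filterMap, PySem.List.mem_pyRange_one]
    refine ⟨(i : Int), ⟨by omega, by rw [hm]; exact_mod_cast hi⟩,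
      (j : Int), ⟨by omega, by rw [hn]; exact_mod_cast hjn⟩, ?_⟩
    rw [if_pos hcell]
  have hxs_ne : xs ≠ [] := List.ne_nil_of_mem hmemij
  -- the shared start cell, in bounds
  obtain ⟨st, hst⟩ : ∃ st, xs.getLast? = some st :=
    ⟨xs.getLast hxs_ne, List.getLast?_eq_some_getLast hxs_ne⟩
  have hst_mem : st ∈ xs := by
    obtain ⟨l', hl'⟩ := List.getLast?_eq_some_iff.mp hst
    rw [hl']
    simp
  have hst_inb : pvInb m n st.1 st.2 = true := by
    rw [hxs] at hst_mem
    simp only [List.mem_flatMap, List.mem_filterMap, PySem.List.mem_pyRange_one] at hst_mem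
    obtain ⟨a, ha, b, hb, hab⟩ := hst_mem
    by_cases hq : pvCell grid a b = "X"
    · rw [if_pos hq, Option.some.injEq] at hab
      subst hab
      simp only [pvInb, decide_eq_true_eq]
      exact ⟨ha.1, ha.2, hb.1, hb.2⟩
    · rw [if_neg hq] at hab
      exact absurd hab (by simp)
  rw [hpos, hget, hst]
  simp only [Option.getD_some]
  -- A = the level loop started on the single-room frontier {st}
  have hmain := pvMain grid m n st (pvUnvis m n []) [] [st] 0 0 rfl (by simp)
    (by intro p hp; simp at hp; subst hp; exact ⟨rfl, rfl⟩)
  have hnew : pvNew m n [] [st] = [st] := by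
    rw [pvNew, if_pos (by simp [hst_inb]), pvNew]
  rw [hnew] at hmain
  rw [show ([st] : List (Int × Int)).map (fun p => (p.1, p.2, (0 : Int))) = [(st.1, st.2, 0)] from by simp] at hmain
  rw [show ([] : List (Int × Int)) ++ [st] = [st] from rfl] at hmain
  rw [show (PySem.Set.empty : PySem.Set (Int × Int)) = ([] : List (Int × Int)) from rfl]
  rw [hmain]
  -- the level loop = |closure| - |999-bounded iterate|
  have hcnt := pvCount grid m n (pvUnvis m n [st]) [st] [st] 0 0 rfl
    ⟨[], rfl, by intro rc h; simp at h⟩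
  rw [hcnt]
  have hofl : (PySem.Set.ofList [st] : PySem.Set (Int × Int)) = [st] := by
    simp [PySem.Set.ofList, PySem.Set.add, PySem.Set.empty]
  rw [show pvGrowTimes grid m n 999 (PySem.Set.ofList [st])
      = pvGrowTimesAux grid m n 999 [st] from by rw [hofl]; rfl]
  rw [pvReach_aux grid m n 999 [st]]
  norm_num
  rfl
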